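-- pv_equiv track=rewrite | github.com/trungpd56/aoc2016 | 01.py | solve
-- ===== SOURCE A (Python) =====
-- dirs = {
--     0: (0, 1),
--     1: (1, 0),
--     2: (0, -1),
--     3: (-1, 0),
-- }
--
-- def solve(lines, p2=False):
--     x, y, dir = 0, 0, 0
--     seen = set()
--     for cmd in lines:
--         if cmd[0] == "R":
--             dir = (dir + 1) % 4
--         elif cmd[0] == "L":
--             dir = (dir - 1) % 4
--         x += dirs[dir][0] * int(cmd[1:])
--         y += dirs[dir][1] * int(cmd[1:])
--         if (x, y) in seen and p2:
--             return abs(x) + abs(y)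
--         seen.add((x, y))
--     return abs(x) + abs(y)
-- ===== SOURCE B (Python) =====
-- def solve(lines, p2=False):
--     # Stage 1: per-command displacement vectors, direction = running turn count mod 4.
--     t = 0
--     moves = []
--     for cmd in lines:
--         if cmd[0] == "R":
--             t += 1
--         elif cmd[0] == "L":
--             t -= 1
--         n = int(cmd[1:])
--         moves.append(((0, 1, 0, -1)[t % 4] * n, (1, 0, -1, 0)[t % 4] * n))
--     # Stage 2: prefix-sum the displacements into the ordered list of endpoints.
--     path = []
--     x = y = 0
--     for dx, dy in moves:
--         x += dx
--         y += dy
--         path.append((x, y))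
--     # Stage 3 (part 2): sort the indexed endpoints by position; a revisited
--     # endpoint shows up as an adjacent equal pair, and the first revisit in
--     # walk order is the smallest later index among those pairs.
--     if p2:
--         order = sorted(enumerate(path), key=lambda e: (e[1][0], e[1][1]))
--         revisit = [j for (_, p), (j, q) in zip(order, order[1:]) if p == q]
--         if revisit:
--             px, py = path[min(revisit)]
--             return abs(px) + abs(py)
--     fx, fy = path[-1] if path else (0, 0)
--     return abs(fx) + abs(fy)
-- ===== Notes on version B (the rewrite author's own statement) =====
-- stated objective: alternative
-- what changed: B replaces A's fused simulate-and-hash loop (dict of deltas indexed by a mod-4 counter, a seen-set checked inline with early return) by a three-stage pipeline: compute per-command displacement vectors from a running turn count, prefix-sum them into the endpoint path, and for part 2 find the first revisit by SORTING the indexed endpoints and taking the minimum later index among adjacent equal positions — sort-then-scan instead of hash-set detection.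
-- outside the precondition, e.g. on solve(['R1', 'R1', 'R1', 'R1', 'R1', 'x'], True): A returns 1, B raises ValueError
import Mathlib
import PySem

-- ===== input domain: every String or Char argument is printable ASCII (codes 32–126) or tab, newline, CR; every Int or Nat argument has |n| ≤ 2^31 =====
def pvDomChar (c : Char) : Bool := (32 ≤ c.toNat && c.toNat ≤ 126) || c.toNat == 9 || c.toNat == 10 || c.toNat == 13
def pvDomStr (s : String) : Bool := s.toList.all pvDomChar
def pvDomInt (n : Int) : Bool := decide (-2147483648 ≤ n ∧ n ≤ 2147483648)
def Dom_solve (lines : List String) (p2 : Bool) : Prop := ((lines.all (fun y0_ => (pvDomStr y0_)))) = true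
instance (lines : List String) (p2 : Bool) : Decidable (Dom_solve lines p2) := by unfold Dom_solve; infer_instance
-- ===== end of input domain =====

-- B replaces the fused simulate-and-hash loop by a three-stage pipeline (displacements from a
-- running turn count, prefix sums, then SORT the indexed endpoints and scan adjacent equal pairs
-- for the earliest revisit); equivalence is about the return value only (no argument is mutated).

-- ===== PORT A =====
-- the module-level 'dirs' dict
def dirsA : PySem.Dict Int (Int × Int) :=
  ((((PySem.Dict.empty).insert 0 (0, 1)).insert 1 (1, 0)).insert 2 (0, -1)).insert 3 (-1, 0)

-- the for-loop of A, with its early return; dirs[dir] is ported as getD (0,0)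
-- (the key is always present: dir stays in 0..3, so the KeyError branch is unreachable)
def solveLoopA : List String → Int → Int → Int → PySem.Set (Int × Int) → Bool → Int
  | [], x, y, _, _, _ => |x| + |y|
  | cmd :: rest, x, y, dir, seen, p2 =>
    let dir' := if PySem.Str.pyGet? cmd 0 = some 'R' then PySem.Int.mod (dir + 1) 4
                else if PySem.Str.pyGet? cmd 0 = some 'L' then PySem.Int.mod (dir - 1) 4
                else dir
    let n := (PySem.Int.ofStr? (PySem.Str.slice cmd (some 1) none)).getD 0  -- int(cmd[1:]); Pre_ excludes ValueError
    let d := (PySem.Dict.get? dirsA dir').getD (0, 0)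
    let x' := x + d.1 * n
    let y' := y + d.2 * n
    if PySem.Set.contains seen (x', y') && p2 then |x'| + |y'|
    else solveLoopA rest x' y' dir' (PySem.Set.add seen (x', y')) p2

def solve (lines : List String) (p2 : Bool) : Int :=
  solveLoopA lines 0 0 0 PySem.Set.empty p2

-- ===== PORT B =====
-- stage 1 of Source B: per-command displacement vectors from a running turn count t
-- ((0,1,0,-1)[t % 4] is a tuple index that is always in range: 0 ≤ t % 4 < 4)
def movesLoop : List String → Int → List (Int × Int)
  | [], _ => []
  | cmd :: rest, t =>
    let t' := if PySem.Str.pyGet? cmd 0 = some 'R' then t + 1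
              else if PySem.Str.pyGet? cmd 0 = some 'L' then t - 1
              else t
    let n := (PySem.Int.ofStr? (PySem.Str.slice cmd (some 1) none)).getD 0  -- int(cmd[1:]); Pre_ excludes ValueError
    (PySem.List.pyGetD [0, 1, 0, -1] (PySem.Int.mod t' 4) 0 * n,
     PySem.List.pyGetD [1, 0, -1, 0] (PySem.Int.mod t' 4) 0 * n) :: movesLoop rest t'

-- stage 2 of Source B: prefix-sum the displacements into the endpoint path
def pathLoop : List (Int × Int) → Int → Int → List (Int × Int)
  | [], _, _ => []
  | (dx, dy) :: rest, x, y => (x + dx, y + dy) :: pathLoop rest (x + dx) (y + dy)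

-- stage 3 of Source B: sorted(enumerate(path), key=...), adjacent equal pairs, min of the later indices
def solve_alt (lines : List String) (p2 : Bool) : Int :=
  let path := pathLoop (movesLoop lines 0) 0 0
  let part2 :=
    if p2 then
      let order := PySem.List.sorted2 (PySem.List.enumerate path) (fun e => e.2.1) (fun e => e.2.2)
      let revisit := ((order.zip (PySem.List.slice order (some 1) none)).filter
                        (fun e => e.1.2 == e.2.2)).map (fun e => e.2.1)
      match PySem.List.min? revisit (fun j => j) with
      | some j => some ((PySem.List.pyGet? path j).getD (0, 0))  -- path[min(revisit)]: index always in range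
      | none => none
    else none
  match part2 with
  | some p => |p.1| + |p.2|
  | none =>
    let f := (PySem.List.pyGet? path (-1)).getD (0, 0)   -- path[-1] if path else (0, 0)
    |f.1| + |f.2|

-- ===== PRECONDITION & SPEC =====
-- Pre_ excludes every input with a malformed command (empty string: IndexError on cmd[0];
-- tail not an int literal: ValueError). A raises on those inputs unless an earlier revisit
-- returns before the bad command is reached; B parses the whole command list first, so it
-- itself raises ValueError on that corner.
def Pre_solve (lines : List String) (p2 : Bool) : Prop :=
  ∀ cmd ∈ lines, (PySem.Str.pyGet? cmd 0).isSome = true ∧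
    (PySem.Int.ofStr? (PySem.Str.slice cmd (some 1) none)).isSome = true
instance (lines : List String) (p2 : Bool) : Decidable (Pre_solve lines p2) := by
  unfold Pre_solve; infer_instance
def pvWitness_solve : List String × Bool := (["R2", "L3", "L3", "L3"], true)

def Spec_solve (lines : List String) (p2 : Bool) (out : Int) : Prop := out = solve_alt lines p2
instance (lines : List String) (p2 : Bool) (out : Int) : Decidable (Spec_solve lines p2 out) := by unfold Spec_solve; infer_instance

-- ===== CLAIM (what is proved, stated in full; the proofs are below) =====
def Claim_equal_solve : Prop := ∀ (lines : List String) (p2 : Bool), Dom_solve lines p2 → Pre_solve lines p2 → Spec_solve lines p2 (solve lines p2)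

-- ===== LEMMAS AND PROOFS =====

-- proof-only canonical form: the endpoint path carried with an explicit heading,
-- and A's set-scan written as a standalone recursion
def headOf (dir : Int) : Int × Int := (PySem.Dict.get? dirsA dir).getD (0, 0)

def buildPath : List String → Int × Int → Int × Int → List (Int × Int)
  | [], _, _ => []
  | cmd :: rest, h, pos =>
    let h' := if PySem.Str.pyGet? cmd 0 = some 'R' then (h.2, -h.1)
              else if PySem.Str.pyGet? cmd 0 = some 'L' then (-h.2, h.1)
              else h
    let n := (PySem.Int.ofStr? (PySem.Str.slice cmd (some 1) none)).getD 0
    let pos' := (pos.1 + h'.1 * n, pos.2 + h'.2 * n)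
    pos' :: buildPath rest h' pos'

def firstRevisit : List (Int × Int) → PySem.Set (Int × Int) → Option (Int × Int)
  | [], _ => none
  | p :: rest, seen =>
    if PySem.Set.contains seen p then some p else firstRevisit rest (PySem.Set.add seen p)

lemma headOf_R (dir : Int) (h : dir = 0 ∨ dir = 1 ∨ dir = 2 ∨ dir = 3) :
    ((headOf dir).2, -(headOf dir).1) = headOf (PySem.Int.mod (dir + 1) 4) := by
  rcases h with h | h | h | h <;> subst h <;> decide

lemma headOf_L (dir : Int) (h : dir = 0 ∨ dir = 1 ∨ dir = 2 ∨ dir = 3) :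
    (-(headOf dir).2, (headOf dir).1) = headOf (PySem.Int.mod (dir - 1) 4) := by
  rcases h with h | h | h | h <;> subst h <;> decide

lemma range_R (dir : Int) (h : dir = 0 ∨ dir = 1 ∨ dir = 2 ∨ dir = 3) :
    PySem.Int.mod (dir + 1) 4 = 0 ∨ PySem.Int.mod (dir + 1) 4 = 1 ∨
    PySem.Int.mod (dir + 1) 4 = 2 ∨ PySem.Int.mod (dir + 1) 4 = 3 := by
  rcases h with h | h | h | h <;> subst h <;> decide

lemma range_L (dir : Int) (h : dir = 0 ∨ dir = 1 ∨ dir = 2 ∨ dir = 3) :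
    PySem.Int.mod (dir - 1) 4 = 0 ∨ PySem.Int.mod (dir - 1) 4 = 1 ∨
    PySem.Int.mod (dir - 1) 4 = 2 ∨ PySem.Int.mod (dir - 1) 4 = 3 := by
  rcases h with h | h | h | h <;> subst h <;> decide

lemma getLast?_getD_cons (p : Int × Int) (l : List (Int × Int)) (d : Int × Int) :
    ((p :: l).getLast?).getD d = (l.getLast?).getD p := by
  cases l with
  | nil => rfl
  | cons q t =>
    rw [List.getLast?_cons_cons]
    cases hl : (q :: t).getLast? with
    | none => simp at hl
    | some a => rfl

-- A's fused loop equals build-then-scan on the canonical path, for any start state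
set_option maxHeartbeats 1000000 in
lemma loop_eq (cmds : List String) : ∀ (x y dir : Int) (seen : PySem.Set (Int × Int)) (p2 : Bool),
    (dir = 0 ∨ dir = 1 ∨ dir = 2 ∨ dir = 3) →
    solveLoopA cmds x y dir seen p2 =
      (match (if p2 then firstRevisit (buildPath cmds (headOf dir) (x, y)) seen else none) with
       | some p => |p.1| + |p.2|
       | none =>
         let f := ((buildPath cmds (headOf dir) (x, y)).getLast?).getD (x, y)
         |f.1| + |f.2|) := by
  induction cmds with
  | nil =>
    intro x y dir seen p2 _
    cases p2 <;> simp [solveLoopA, buildPath, firstRevisit]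
  | cons cmd rest ih =>
    intro x y dir seen p2 hdir
    rw [solveLoopA, buildPath]
    set dir' := (if PySem.Str.pyGet? cmd 0 = some 'R' then PySem.Int.mod (dir + 1) 4
         else if PySem.Str.pyGet? cmd 0 = some 'L' then PySem.Int.mod (dir - 1) 4
         else dir) with hdir'
    have hhead :
        (if PySem.Str.pyGet? cmd 0 = some 'R' then ((headOf dir).2, -(headOf dir).1)
         else if PySem.Str.pyGet? cmd 0 = some 'L' then (-(headOf dir).2, (headOf dir).1)
         else headOf dir) = headOf dir' := by
      rw [hdir']
      split_ifs with h1 h2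
      · exact headOf_R dir hdir
      · exact headOf_L dir hdir
      · rfl
    have hdir'range : dir' = 0 ∨ dir' = 1 ∨ dir' = 2 ∨ dir' = 3 := by
      rw [hdir']
      split_ifs with h1 h2
      · exact range_R dir hdir
      · exact range_L dir hdir
      · exact hdir
    simp only [hhead]
    have hHdef : (PySem.Dict.get? dirsA dir').getD (0, 0) = headOf dir' := rfl
    rw [hHdef]
    set n := (PySem.Int.ofStr? (PySem.Str.slice cmd (some 1) none)).getD 0 with hn
    set a := x + (headOf dir').1 * n with ha
    set b := y + (headOf dir').2 * n with hb
    cases p2 with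
    | false =>
      simp only [Bool.and_false, Bool.false_eq_true, if_false]
      rw [ih a b dir' (PySem.Set.add seen (a, b)) false hdir'range]
      simp only [Bool.false_eq_true, if_false, getLast?_getD_cons]
    | true =>
      simp only [Bool.and_true, if_true]
      by_cases hc : PySem.Set.contains seen (a, b) = true
      · simp only [hc, if_true, firstRevisit]
      · simp only [firstRevisit]
        simp only [hc, if_false, Bool.false_eq_true]
        rw [ih a b dir' (PySem.Set.add seen (a, b)) true hdir'range]
        simp only [if_true, getLast?_getD_cons]

-- B's stage-1/stage-2 pipeline produces the canonical path
lemma mod4_range (t : Int) :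
    PySem.Int.mod t 4 = 0 ∨ PySem.Int.mod t 4 = 1 ∨ PySem.Int.mod t 4 = 2 ∨ PySem.Int.mod t 4 = 3 := by
  have h1 := PySem.Int.mod_nonneg t (b := 4) (by norm_num)
  have h2 := PySem.Int.mod_lt t (b := 4) (by norm_num)
  omega

lemma mod4_shift (t c : Int) :
    PySem.Int.mod (PySem.Int.mod t 4 + c) 4 = PySem.Int.mod (t + c) 4 := by
  rw [PySem.Int.mod_eq_emod_of_pos (by norm_num), PySem.Int.mod_eq_emod_of_pos (by norm_num),
    PySem.Int.mod_eq_emod_of_pos (by norm_num)]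
  omega

lemma table_eq_headOf (m : Int) (h : m = 0 ∨ m = 1 ∨ m = 2 ∨ m = 3) :
    ((PySem.List.pyGetD [0, 1, 0, -1] m 0 : Int), (PySem.List.pyGetD [1, 0, -1, 0] m 0 : Int)) =
      headOf m := by
  rcases h with h | h | h | h <;> subst h <;> decide

lemma pipeline_eq_buildPath (cmds : List String) : ∀ (t x y : Int),
    pathLoop (movesLoop cmds t) x y = buildPath cmds (headOf (PySem.Int.mod t 4)) (x, y) := by
  induction cmds with
  | nil => intro t x y; rfl
  | cons cmd rest ih =>
    intro t x y
    rw [movesLoop, buildPath]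
    set t' := (if PySem.Str.pyGet? cmd 0 = some 'R' then t + 1
         else if PySem.Str.pyGet? cmd 0 = some 'L' then t - 1
         else t) with ht'
    have hhead :
        (if PySem.Str.pyGet? cmd 0 = some 'R' then
            ((headOf (PySem.Int.mod t 4)).2, -(headOf (PySem.Int.mod t 4)).1)
         else if PySem.Str.pyGet? cmd 0 = some 'L' then
            (-(headOf (PySem.Int.mod t 4)).2, (headOf (PySem.Int.mod t 4)).1)
         else headOf (PySem.Int.mod t 4)) = headOf (PySem.Int.mod t' 4) := by
      rw [ht']
      split_ifs with h1 h2
      · rw [headOf_R _ (mod4_range t), mod4_shift]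
      · rw [headOf_L _ (mod4_range t)]
        have h := mod4_shift t (-1)
        rw [show PySem.Int.mod t 4 + -1 = PySem.Int.mod t 4 - 1 by ring,
          show t + -1 = t - 1 by ring] at h
        rw [h]
      · rfl
    simp only [hhead]
    set n := (PySem.Int.ofStr? (PySem.Str.slice cmd (some 1) none)).getD 0 with hn
    have htab := table_eq_headOf (PySem.Int.mod t' 4) (mod4_range t')
    rw [pathLoop]
    have hdx : PySem.List.pyGetD [0, 1, 0, -1] (PySem.Int.mod t' 4) 0 =
        (headOf (PySem.Int.mod t' 4)).1 := congrArg Prod.fst htab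
    have hdy : PySem.List.pyGetD [1, 0, -1, 0] (PySem.Int.mod t' 4) 0 =
        (headOf (PySem.Int.mod t' 4)).2 := congrArg Prod.snd htab
    rw [hdx, hdy, ih]

def bef (a b : Int × (Int × Int)) : Bool :=
  decide (a.2.1 < b.2.1) || (!decide (b.2.1 < a.2.1) && decide (a.2.2 < b.2.2))

def Rlex (a b : Int × (Int × Int)) : Prop :=
  a.2.1 < b.2.1 ∨ (a.2.1 = b.2.1 ∧ (a.2.2 < b.2.2 ∨ (a.2.2 = b.2.2 ∧ a.1 < b.1)))

lemma bef_iff (a b : Int × (Int × Int)) :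
    bef a b = true ↔ (a.2.1 < b.2.1 ∨ (a.2.1 = b.2.1 ∧ a.2.2 < b.2.2)) := by
  simp [bef]; omega

lemma insertBy_pairwise (x : Int × (Int × Int)) : ∀ (acc : List (Int × (Int × Int))),
    acc.Pairwise Rlex → (∀ a ∈ acc, a.1 < x.1) →
    (PySem.List.insertBy bef x acc).Pairwise Rlex := by
  intro acc
  induction acc with
  | nil => intro _ _; simp [PySem.List.insertBy]
  | cons y ys ih =>
    intro hp hidx
    rw [List.pairwise_cons] at hp
    obtain ⟨hy, hys⟩ := hp
    by_cases hb : bef x y = true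
    · have : PySem.List.insertBy bef x (y :: ys) = x :: y :: ys := by
        simp [PySem.List.insertBy, hb]
      rw [this]
      constructor
      · intro z hz
        rcases List.mem_cons.mp hz with rfl | hz'
        · have := (bef_iff x z).mp hb; unfold Rlex; omega
        · have h1 := (bef_iff x y).mp hb
          have h2 := hy z hz'
          unfold Rlex at h2 ⊢; omega
      · exact List.pairwise_cons.mpr ⟨hy, hys⟩
    · have : PySem.List.insertBy bef x (y :: ys) = y :: PySem.List.insertBy bef x ys := by
        simp [PySem.List.insertBy, hb]
      rw [this]
      constructor
      · intro z hz
        rcases (PySem.List.mem_insertBy bef x z ys).mp hz with hzx | hz'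
        · rw [hzx]
          have h1 : ¬ (bef x y = true) := hb
          rw [bef_iff] at h1
          have h2 := hidx y (List.mem_cons_self ..)
          unfold Rlex; omega
        · exact hy z hz'
      · exact ih hys (fun a ha => hidx a (List.mem_cons_of_mem _ ha))

lemma foldl_insert_pairwise : ∀ (xs acc : List (Int × (Int × Int))),
    acc.Pairwise Rlex → (∀ a ∈ acc, ∀ b ∈ xs, a.1 < b.1) →
    xs.Pairwise (fun a b => a.1 < b.1) →
    (xs.foldl (fun acc x => PySem.List.insertBy bef x acc) acc).Pairwise Rlex := by
  intro xs
  induction xs with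
  | nil => intro acc h _ _; simpa using h
  | cons x xs ih =>
    intro acc hacc hcross hxs
    rw [List.pairwise_cons] at hxs
    obtain ⟨hx, hxs'⟩ := hxs
    simp only [List.foldl_cons]
    apply ih
    · exact insertBy_pairwise x acc hacc (fun a ha => hcross a ha x (List.mem_cons_self ..))
    · intro a ha b hb
      rcases (PySem.List.mem_insertBy bef x a acc).mp ha with rfl | ha'
      · exact hx b hb
      · exact hcross a ha' b (List.mem_cons_of_mem _ hb)
    · exact hxs'

lemma sorted2_pairwise_Rlex (xs : List (Int × (Int × Int)))
    (h : xs.Pairwise (fun a b => a.1 < b.1)) :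
    (PySem.List.sorted2 xs (fun e => e.2.1) (fun e => e.2.2)).Pairwise Rlex := by
  have : PySem.List.sorted2 xs (fun e => e.2.1) (fun e => e.2.2) false =
      xs.foldl (fun acc x => PySem.List.insertBy bef x acc) [] := rfl
  rw [this]
  exact foldl_insert_pairwise xs [] (by simp) (by simp) h

-- abbreviation for the B-side artifacts
def ordOf (path : List (Int × Int)) : List (Int × (Int × Int)) :=
  PySem.List.sorted2 (PySem.List.enumerate path) (fun e => e.2.1) (fun e => e.2.2)

def revisitOf (path : List (Int × Int)) : List Int :=
  (((ordOf path).zip (PySem.List.slice (ordOf path) (some 1) none)).filter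
      (fun e => e.1.2 == e.2.2)).map (fun e => e.2.1)

lemma ord_pairwise (path : List (Int × Int)) : (ordOf path).Pairwise Rlex := by
  apply sorted2_pairwise_Rlex
  exact PySem.List.pairwise_lt_enumerate path 0

lemma mem_ord (path : List (Int × Int)) (e : Int × (Int × Int)) :
    e ∈ ordOf path ↔ ∃ k, ∃ _h : k < path.length, e = ((k : Int), path[k]) := by
  rw [ordOf, (PySem.List.sorted2_perm (PySem.List.enumerate path) _ _ false).mem_iff,
    PySem.List.mem_enumerate_iff]
  simp

lemma mem_revisit_iff (path : List (Int × Int)) (j : Int) :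
    j ∈ revisitOf path ↔
      ∃ (k1 k2 : Nat) (_h2 : k2 < path.length) (_h1 : k1 < path.length),
        k1 < k2 ∧ path[k1] = path[k2] ∧ j = (k2 : Int) := by
  have hR := ord_pairwise path
  rw [List.pairwise_iff_getElem] at hR
  constructor
  · intro hj
    rw [revisitOf, PySem.List.slice_from_one] at hj
    obtain ⟨e, he, hej⟩ := List.mem_map.mp hj
    obtain ⟨hez, heq⟩ := List.mem_filter.mp he
    obtain ⟨i, hi, hie⟩ := List.mem_iff_getElem.mp hez
    have hlen : i + 1 < (ordOf path).length := by
      have := hi; rw [List.length_zip, List.length_tail] at this; omega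
    have hi1 : i < (ordOf path).length := by omega
    have hit : i < (ordOf path).tail.length := by rw [List.length_tail]; omega
    have hie' : e = ((ordOf path)[i], (ordOf path)[i+1]) := by
      rw [← hie, List.getElem_zip, List.getElem_tail]
    have hpos : e.1.2 = e.2.2 := by
      have := heq; simp at this; exact this
    obtain ⟨k1, hk1, ha⟩ := (mem_ord path _).mp (List.getElem_mem hi1)
    obtain ⟨k2, hk2, hb⟩ := (mem_ord path _).mp (List.getElem_mem hlen)
    have hRab := hR i (i+1) hi1 hlen (by omega)
    rw [ha, hb] at hRab
    rw [hie', ha, hb] at hpos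
    simp at hpos
    have hk12 : k1 < k2 := by
      rw [hpos] at hRab
      unfold Rlex at hRab
      simp at hRab
      exact_mod_cast hRab
    refine ⟨k1, k2, hk2, hk1, hk12, by rw [hpos], ?_⟩
    rw [← hej, hie', hb]
  · rintro ⟨k1, k2, h2, h1, hlt, hpq, rfl⟩
    have ha : ((k1 : Int), path[k1]) ∈ ordOf path := (mem_ord path _).mpr ⟨k1, h1, rfl⟩
    have hb : ((k2 : Int), path[k2]) ∈ ordOf path := (mem_ord path _).mpr ⟨k2, h2, rfl⟩
    obtain ⟨p, hp, hpe⟩ := List.mem_iff_getElem.mp ha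
    obtain ⟨q, hq, hqe⟩ := List.mem_iff_getElem.mp hb
    have hpneq : p ≠ q := by
      intro h
      subst h
      have h12 : ((k1 : Int), path[k1]) = ((k2 : Int), path[k2]) := hpe.symm.trans hqe
      have : (k1 : Int) = (k2 : Int) := congrArg Prod.fst h12
      omega
    have hplq : p < q := by
      rcases Nat.lt_or_ge p q with h | h
      · exact h
      · exfalso
        have hqp : q < p := by omega
        have := hR q p hq hp hqp
        rw [hqe, hpe] at this
        rw [hpq] at this
        unfold Rlex at this
        simp at this
        omega
    -- the element just before position q has the same position value
    have hq1 : q - 1 < (ordOf path).length := by omega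
    have hmid : ((ordOf path)[q-1]'hq1).2 = path[k2] := by
      have hcase : p = q - 1 ∨ p < q - 1 := by omega
      rcases hcase with hpq1 | hpq1
      · have : (ordOf path)[q-1]'hq1 = ((k1:Int), path[k1]) := by
          rw [← hpe]; congr 1; omega
        rw [this, hpq]
      · have h1 := hR p (q-1) hp hq1 hpq1
        have h2 := hR (q-1) q hq1 hq (by omega)
        rw [hpe] at h1
        rw [hqe] at h2
        rw [hpq] at h1
        set m := (ordOf path)[q-1]'hq1 with hm
        unfold Rlex at h1 h2
        dsimp only at h1 h2
        have hx : m.2.1 = path[k2].1 := by omega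
        have hy : m.2.2 = path[k2].2 := by omega
        exact Prod.ext hx hy
    -- produce the zip element at index q-1
    rw [revisitOf, PySem.List.slice_from_one]
    apply List.mem_map.mpr
    refine ⟨((ordOf path)[q-1]'hq1, (ordOf path)[q]'hq), ?_, by rw [hqe]⟩
    apply List.mem_filter.mpr
    constructor
    · apply List.mem_iff_getElem.mpr
      have hzl : q - 1 < ((ordOf path).zip (ordOf path).tail).length := by
        rw [List.length_zip, List.length_tail]; omega
      refine ⟨q - 1, hzl, ?_⟩
      rw [List.getElem_zip, List.getElem_tail]
      congr 2
      omega
    · simp only [beq_iff_eq]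
      rw [hmid, hqe]

lemma fr_none_iff : ∀ (l : List (Int × Int)) (s : PySem.Set (Int × Int)) (pre : List (Int × Int)),
    (∀ q, q ∈ s ↔ q ∈ pre) →
    (firstRevisit l s = none ↔ ∀ j < l.length, l.getD j (0, 0) ∉ pre ++ l.take j) := by
  intro l
  induction l with
  | nil => intro s pre _; simp [firstRevisit]
  | cons p rest ih =>
    intro s pre hmem
    by_cases hp : p ∈ pre
    · have hc : PySem.Set.contains s p = true := by
        rw [PySem.Set.contains, List.contains_iff_mem, hmem]; exact hp
      rw [firstRevisit, hc]
      simp only [if_true, reduceCtorEq, false_iff]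
      intro hall
      exact hall 0 (by simp) (by simpa using hp)
    · have hc : ¬ (PySem.Set.contains s p = true) := by
        rw [PySem.Set.contains, List.contains_iff_mem, hmem]; exact hp
      rw [firstRevisit, if_neg hc]
      rw [ih (PySem.Set.add s p) (pre ++ [p])
        (by intro q; rw [PySem.Set.mem_add, hmem]; simp)]
      constructor
      · intro hall j hj
        cases j with
        | zero => simpa using hp
        | succ j' =>
          have := hall j' (by simpa using hj)
          simp only [List.append_assoc, List.singleton_append] at this
          simpa using this
      · intro hall j hj
        have := hall (j + 1) (by simpa using hj)
        simp only [List.getD_cons_succ, List.take_succ_cons] at this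
        simpa [List.append_assoc] using this

lemma fr_some : ∀ (l : List (Int × Int)) (s : PySem.Set (Int × Int)) (pre : List (Int × Int)),
    (∀ q, q ∈ s ↔ q ∈ pre) →
    ∀ j, j < l.length → l.getD j (0, 0) ∈ pre ++ l.take j →
    (∀ j' < j, l.getD j' (0, 0) ∉ pre ++ l.take j') →
    firstRevisit l s = some (l.getD j (0, 0)) := by
  intro l
  induction l with
  | nil => intro _ _ _ j hj; simp at hj
  | cons p rest ih =>
    intro s pre hmem j hj hmemj hminj
    cases j with
    | zero =>
      have hp : p ∈ pre := by simpa using hmemj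
      have hc : PySem.Set.contains s p = true := by
        rw [PySem.Set.contains, List.contains_iff_mem, hmem]; exact hp
      rw [firstRevisit, hc]
      simp
    | succ j' =>
      have hp : p ∉ pre := by
        have := hminj 0 (by omega)
        simpa using this
      have hc : ¬ (PySem.Set.contains s p = true) := by
        rw [PySem.Set.contains, List.contains_iff_mem, hmem]; exact hp
      rw [firstRevisit, if_neg hc]
      rw [List.getD_cons_succ]
      apply ih (PySem.Set.add s p) (pre ++ [p])
        (by intro q; rw [PySem.Set.mem_add, hmem]; simp)
      · simpa using hj
      · have := hmemj
        simp only [List.getD_cons_succ, List.take_succ_cons] at this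
        simpa [List.append_assoc] using this
      · intro j'' hj''
        have := hminj (j'' + 1) (by omega)
        simp only [List.getD_cons_succ, List.take_succ_cons] at this
        simpa [List.append_assoc] using this

lemma take_mem_iff (path : List (Int × Int)) (j : Nat) (hj : j < path.length) :
    (path.getD j (0, 0) ∈ ([] : List (Int × Int)) ++ path.take j ↔
      ∃ k1 < j, path.getD k1 (0, 0) = path.getD j (0, 0)) := by
  rw [List.nil_append, List.mem_take_iff_getElem]
  constructor
  · rintro ⟨i, hi, he⟩
    exact ⟨i, by omega, by rw [List.getD_eq_getElem path _ (by omega), he]⟩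
  · rintro ⟨k1, hk1, he⟩
    exact ⟨k1, by omega, by rw [← List.getD_eq_getElem path (0,0) (by omega), he]⟩

lemma sortscan_core (path : List (Int × Int)) :
    (match PySem.List.min? (revisitOf path) (fun j => j) with
     | some j => some ((PySem.List.pyGet? path j).getD (0, 0))
     | none => none) = firstRevisit path PySem.Set.empty := by
  have hmem0 : ∀ q : Int × Int, q ∈ (PySem.Set.empty : PySem.Set (Int × Int)) ↔ q ∈ ([] : List (Int × Int)) := by
    intro q; rfl
  cases hmin : PySem.List.min? (revisitOf path) (fun j => j) with
  | none =>
    rw [PySem.List.min?_eq_none_iff] at hmin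
    have hnone : firstRevisit path PySem.Set.empty = none := by
      rw [fr_none_iff path PySem.Set.empty [] hmem0]
      intro j hj hmemj
      obtain ⟨k1, hk1, he⟩ := (take_mem_iff path j hj).mp hmemj
      have : ((j : Int)) ∈ revisitOf path := by
        rw [mem_revisit_iff]
        exact ⟨k1, j, hj, by omega, hk1,
          by rw [← List.getD_eq_getElem path (0,0) (by omega), ← List.getD_eq_getElem path (0,0) hj, he], rfl⟩
      rw [hmin] at this
      exact absurd this (List.not_mem_nil)
    rw [hnone]
  | some jm =>
    have hjm := PySem.List.min?_mem hmin
    have hjmin := PySem.List.min?_isMin hmin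
    obtain ⟨k1, k2, hk2, hk1, hlt, hpq, hje⟩ := (mem_revisit_iff path jm).mp hjm
    -- the least index with an earlier equal endpoint
    have hPex : ∃ j, j < path.length ∧ ∃ i < j, path.getD i (0, 0) = path.getD j (0, 0) := by
      exact ⟨k2, hk2, k1, hlt,
        by rw [List.getD_eq_getElem path _ hk1, List.getD_eq_getElem path _ hk2, hpq]⟩
    let j0 := Nat.find hPex
    obtain ⟨hj0len, i0, hi0, hi0e⟩ := Nat.find_spec hPex
    have hfr : firstRevisit path PySem.Set.empty = some (path.getD j0 (0, 0)) := by
      apply fr_some path PySem.Set.empty [] hmem0 j0 hj0len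
      · exact (take_mem_iff path j0 hj0len).mpr ⟨i0, hi0, hi0e⟩
      · intro j' hj' hmemj
        obtain ⟨i, hi, he⟩ := (take_mem_iff path j' (by omega)).mp hmemj
        exact Nat.find_min hPex hj' ⟨by omega, i, hi, he⟩
    rw [hfr]
    -- jm = j0 as integers
    have hj0rev : ((j0 : Nat) : Int) ∈ revisitOf path := by
      rw [mem_revisit_iff]
      exact ⟨i0, j0, hj0len, by omega, hi0,
        by rw [← List.getD_eq_getElem path (0,0) (by omega), ← List.getD_eq_getElem path (0,0) hj0len, hi0e], rfl⟩
    have h1 : jm ≤ (j0 : Int) := hjmin _ hj0rev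
    have h2 : j0 ≤ k2 := Nat.find_min' hPex ⟨hk2, k1, hlt,
      by rw [List.getD_eq_getElem path _ hk1, List.getD_eq_getElem path _ hk2, hpq]⟩
    have hjj : jm = (j0 : Int) := by omega
    rw [hjj]
    simp only [PySem.List.pyGet?_natCast]
    rw [List.getD_eq_getElem path (0,0) hj0len, List.getElem?_eq_getElem hj0len]
    rfl

-- the sort-then-scan of stage 3 equals the set scan
lemma sortscan_eq_firstRevisit (path : List (Int × Int)) :
    (let order := PySem.List.sorted2 (PySem.List.enumerate path) (fun e => e.2.1) (fun e => e.2.2)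
     let revisit := ((order.zip (PySem.List.slice order (some 1) none)).filter
                       (fun e => e.1.2 == e.2.2)).map (fun e => e.2.1)
     match PySem.List.min? revisit (fun j => j) with
     | some j => some ((PySem.List.pyGet? path j).getD (0, 0))
     | none => none) = firstRevisit path PySem.Set.empty :=
  sortscan_core path

-- ===== VERDICT (by name: the statement is the Claim_ definition above) =====
theorem solve_spec : Claim_equal_solve := by
  intro lines p2 _ _
  unfold Spec_solve solve solve_alt
  have h := loop_eq lines 0 0 0 PySem.Set.empty p2 (Or.inl rfl)
  rw [h]
  have hp : pathLoop (movesLoop lines 0) 0 0 = buildPath lines (headOf 0) (0, 0) := by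
    have := pipeline_eq_buildPath lines 0 0 0
    simpa using this
  simp only [hp]
  rw [sortscan_eq_firstRevisit]
  cases p2 with
  | false => simp [PySem.List.pyGet?_neg_one]
  | true =>
    cases hfr : firstRevisit (buildPath lines (headOf 0) (0, 0)) PySem.Set.empty with
    | some p => simp
    | none => simp [PySem.List.pyGet?_neg_one]
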